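-- pv_equiv track=rewrite | github.com/nikifkon/ext4_tools | ext4/utils.py | say_when_last
-- ===== SOURCE A (Python) =====
-- def say_when_last(iterator):
--     prev = None
--     for element in iterator:
--         if prev:
--             yield False, prev
--         prev = element
--     if prev:
--         yield True, prev
-- ===== SOURCE B (Python) =====
-- def say_when_last(iterator):
--     items = list(iterator)
--     n = len(items)
--     for i, e in enumerate(items):
--         if e:
--             yield i == n - 1, e
-- ===== Notes on version B (the rewrite author's own statement) =====
-- stated objective: simpler
-- what changed: Replaces the streaming remember-previous-element strategy (deferred yield of the held element, last-ness discovered only at loop exit) by materializing the input and a single enumerate pass that computes the flag directly as i == len-1.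
import Mathlib
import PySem

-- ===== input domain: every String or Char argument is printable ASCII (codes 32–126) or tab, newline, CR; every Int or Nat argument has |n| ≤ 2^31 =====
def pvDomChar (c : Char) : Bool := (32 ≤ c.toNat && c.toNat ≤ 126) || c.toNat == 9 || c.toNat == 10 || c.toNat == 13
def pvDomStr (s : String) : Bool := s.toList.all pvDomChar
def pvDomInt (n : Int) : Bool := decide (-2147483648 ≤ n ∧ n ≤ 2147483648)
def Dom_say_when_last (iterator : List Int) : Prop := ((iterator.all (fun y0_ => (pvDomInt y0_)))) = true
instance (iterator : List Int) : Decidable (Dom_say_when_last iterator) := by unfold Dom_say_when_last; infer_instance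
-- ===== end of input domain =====

-- B replaces A's remember-previous streaming strategy with a materialize-then-enumerate
-- pass computing the flag as i == len-1 (objective: simpler). Both generators are
-- collected to lists; equivalence is about the sequence of yielded pairs.

-- ===== PORT A =====
-- A-side helpers: prev : Option Int (None at start); `if prev:` is true iff prev is a nonzero int.
-- pvStepA is the loop body (yield (False, prev) if prev, then prev = element);
-- pvFinA is the trailing `if prev: yield True, prev`.
def pvStepA (st : List (Bool × Int) × Option Int) (element : Int) : List (Bool × Int) × Option Int :=
  let out := match st.2 with
    | some p => if p ≠ 0 then st.1 ++ [(false, p)] else st.1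
    | none => st.1
  (out, some element)

def pvFinA (s : List (Bool × Int) × Option Int) : List (Bool × Int) :=
  match s.2 with
  | some p => if p ≠ 0 then s.1 ++ [(true, p)] else s.1
  | none => s.1

def say_when_last (iterator : List Int) : List (Bool × Int) :=
  pvFinA (iterator.foldl pvStepA ([], none))

-- ===== PORT B =====
-- B-side helper: pvStepB n is the loop body (yield (i == n - 1, e) if e).
def pvStepB (n : Int) (acc : List (Bool × Int)) (ie : Int × Int) : List (Bool × Int) :=
  if ie.2 ≠ 0 then acc ++ [(decide (ie.1 = n - 1), ie.2)] else acc

def say_when_last_alt (iterator : List Int) : List (Bool × Int) :=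
  let n : Int := iterator.length
  (PySem.List.enumerate iterator).foldl (pvStepB n) []

-- ===== PRECONDITION & SPEC =====
def Spec_say_when_last (iterator : List Int) (out : List (Bool × Int)) : Prop := out = say_when_last_alt iterator
instance (iterator : List Int) (out : List (Bool × Int)) : Decidable (Spec_say_when_last iterator out) := by unfold Spec_say_when_last; infer_instance

-- ===== CLAIM (what is proved, stated in full; the proofs are below) =====
def Claim_equal_say_when_last : Prop := ∀ (iterator : List Int), Dom_say_when_last iterator → Spec_say_when_last iterator (say_when_last iterator)

-- ===== LEMMAS AND PROOFS =====

-- canonical form: (false, e) for every nonzero non-final element, (true, e) for a nonzero final one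
def pvH : List Int → List (Bool × Int)
  | [] => []
  | [e] => if e ≠ 0 then [(true, e)] else []
  | e :: e' :: l => (if e ≠ 0 then [(false, e)] else []) ++ pvH (e' :: l)

-- what remains of A's output given the pending prev and the remaining input
def pvG : Option Int → List Int → List (Bool × Int)
  | some p, [] => if p ≠ 0 then [(true, p)] else []
  | none, [] => []
  | some p, e :: l => (if p ≠ 0 then [(false, p)] else []) ++ pvG (some e) l
  | none, e :: l => pvG (some e) l

theorem pvA_fold (l : List Int) (acc : List (Bool × Int)) (prev : Option Int) :
    pvFinA (l.foldl pvStepA (acc, prev)) = acc ++ pvG prev l := by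
  induction l generalizing acc prev with
  | nil =>
    cases prev with
    | none => simp [pvG, pvFinA]
    | some p => by_cases hp : p = 0 <;> simp [pvG, pvFinA, hp]
  | cons e l ih =>
    cases prev with
    | none => simpa [pvG, pvStepA] using ih acc (some e)
    | some p =>
      by_cases hp : p = 0 <;> simp [pvG, pvStepA, hp, ih _ (some e)]

theorem pvG_some (p : Int) (l : List Int) :
    pvG (some p) l = (if p ≠ 0 then [(l.isEmpty, p)] else []) ++ pvH l := by
  induction l generalizing p with
  | nil => simp [pvG, pvH]
  | cons e l ih =>
    rw [pvG, ih]
    cases l <;> simp [pvH]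

theorem pvA_eq_H (l : List Int) : say_when_last l = pvH l := by
  rw [say_when_last, pvA_fold l [] none]
  cases l with
  | nil => simp [pvG, pvH]
  | cons e l' =>
    rw [pvG, pvG_some]
    cases l' <;> simp [pvH]

theorem pvB_fold (l : List Int) (k : Int) (n : Int) (acc : List (Bool × Int))
    (hk : k + l.length = n) :
    (PySem.List.enumerate l k).foldl (pvStepB n) acc = acc ++ pvH l := by
  induction l generalizing k acc with
  | nil => simp [PySem.List.enumerate_nil, pvH]
  | cons e l ih =>
    rw [PySem.List.enumerate_cons]
    cases l with
    | nil =>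
      have hkn : k = n - 1 := by simp at hk; omega
      by_cases he : e = 0 <;>
        simp [PySem.List.enumerate_nil, pvH, pvStepB, he, hkn]
    | cons e' l' =>
      have hkn : ¬ (k = n - 1) := by simp at hk; omega
      have hk' : (k + 1) + (e' :: l').length = n := by simp at hk ⊢; omega
      rw [List.foldl_cons, ih (k + 1) _ hk']
      by_cases he : e = 0 <;> simp [pvH, pvStepB, he, hkn]

theorem pvB_eq_H (l : List Int) : say_when_last_alt l = pvH l := by
  rw [say_when_last_alt]
  exact pvB_fold l 0 (l.length) [] (by simp)

-- ===== VERDICT (by name: the statement is the Claim_ definition above) =====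
theorem say_when_last_spec : Claim_equal_say_when_last := by
  intro l _
  unfold Spec_say_when_last
  rw [pvA_eq_H, pvB_eq_H]
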